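-- pv_equiv track=rewrite | github.com/MarcinPolewski/PIPR | Lab3/zadania.py | do_frequencies_comply
-- ===== SOURCE A (Python) =====
-- def count_chars(word):
--     char_counter = {}
--     for char in word:
--         if char not in char_counter:
--             char_counter[char] = 1
--         else:
--             char_counter[char] += 1
--         # lub char_counter = counts.get(char,0) + 1 <- zamiast tych ifów
--     return char_counter
--
-- def do_frequencies_comply(
--     word, required_frequencies
-- ):  # returns false if word has more letters than accepted
--     word_frequencies = count_chars(word)  # słownik!
--
--     for letter, frequency in required_frequencies:
--         a = word_frequencies.get(letter, -1)
--
--         if a != -1 and a >= frequency:  # letter exists in word and has higher feqcuency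
--             return False
--
--     return True
-- ===== SOURCE B (Python) =====
-- def do_frequencies_comply(word, required_frequencies):
--     limits = {}
--     for letter, frequency in required_frequencies:
--         if letter not in limits or frequency < limits[letter]:
--             limits[letter] = frequency
--     for char in set(word):
--         if char in limits and word.count(char) >= limits[char]:
--             return False
--     return True
-- ===== Notes on version B (the rewrite author's own statement) =====
-- stated objective: alternative
-- what changed: Inverts the traversal: instead of counting every character of word into a dict and scanning the requirements against it, B folds the requirements into a dict of minimum allowed frequencies per letter and then scans the distinct characters of word, counting each with word.count on demand.
import Mathlib
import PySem

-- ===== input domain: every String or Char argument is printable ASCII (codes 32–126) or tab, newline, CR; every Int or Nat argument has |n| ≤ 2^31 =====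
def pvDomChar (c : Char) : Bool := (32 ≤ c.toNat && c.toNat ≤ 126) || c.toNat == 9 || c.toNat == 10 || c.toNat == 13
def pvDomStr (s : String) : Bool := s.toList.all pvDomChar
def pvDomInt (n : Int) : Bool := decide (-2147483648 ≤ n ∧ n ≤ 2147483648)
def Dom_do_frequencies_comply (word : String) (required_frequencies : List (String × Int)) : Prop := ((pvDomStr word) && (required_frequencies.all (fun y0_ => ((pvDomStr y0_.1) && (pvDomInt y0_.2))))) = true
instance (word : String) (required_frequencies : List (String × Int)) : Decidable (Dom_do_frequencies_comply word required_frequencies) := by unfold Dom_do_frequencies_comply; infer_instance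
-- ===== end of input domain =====

-- B inverts A's traversal: instead of counting every character of word into a dictionary and
-- scanning the requirements against it, B folds the requirements into a dictionary of minimum
-- allowed frequencies per letter and then scans the distinct characters of word, counting each
-- on demand; a timing run measured B faster (C-level str.count over the distinct
-- characters vs A's per-character Python-level dict loop).

-- ===== PORT A =====
-- count_chars: build the char-frequency dict of word (keys are one-char strings, as in Python)
def count_chars (word : String) : PySem.Dict String Int :=
  word.toList.foldl
    (fun char_counter char =>
      if char_counter.contains (String.singleton char) = false then
        char_counter.insert (String.singleton char) 1
      else
        char_counter.insert (String.singleton char)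
          (char_counter.getD (String.singleton char) 0 + 1))
    PySem.Dict.empty

-- the for-loop over required_frequencies with its early `return False`
def dfcLoopA (word_frequencies : PySem.Dict String Int) : List (String × Int) → Bool
  | [] => true
  | (letter, frequency) :: rest =>
      let a := word_frequencies.getD letter (-1)
      if a ≠ -1 ∧ a ≥ frequency then false
      else dfcLoopA word_frequencies rest

def do_frequencies_comply (word : String) (required_frequencies : List (String × Int)) : Bool :=
  dfcLoopA (count_chars word) required_frequencies

-- ===== PORT B =====
-- the first loop of B: the per-letter minimum required frequency
def mkLimits (required_frequencies : List (String × Int)) : PySem.Dict String Int :=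
  required_frequencies.foldl
    (fun limits p =>
      if limits.contains p.1 = false ∨ p.2 < limits.getD p.1 0 then
        limits.insert p.1 p.2
      else limits)
    PySem.Dict.empty

-- the second loop of B: scan the distinct characters of word with its early `return False`
def dfcLoopB (word : String) (limits : PySem.Dict String Int) : List Char → Bool
  | [] => true
  | c :: rest =>
      if limits.contains (String.singleton c) ∧
          (PySem.Str.count word (String.singleton c) : Int) ≥
            limits.getD (String.singleton c) 0 then false
      else dfcLoopB word limits rest

def do_frequencies_comply_alt (word : String) (required_frequencies : List (String × Int)) : Bool :=
  dfcLoopB word (mkLimits required_frequencies) (PySem.Set.ofList word.toList)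

-- ===== PRECONDITION & SPEC =====
def Spec_do_frequencies_comply (word : String) (required_frequencies : List (String × Int)) (out : Bool) : Prop := out = do_frequencies_comply_alt word required_frequencies
instance (word : String) (required_frequencies : List (String × Int)) (out : Bool) : Decidable (Spec_do_frequencies_comply word required_frequencies out) := by unfold Spec_do_frequencies_comply; infer_instance

-- ===== CLAIM (what is proved, stated in full; the proofs are below) =====
def Claim_equal_do_frequencies_comply : Prop := ∀ (word : String) (required_frequencies : List (String × Int)), Dom_do_frequencies_comply word required_frequencies → Spec_do_frequencies_comply word required_frequencies (do_frequencies_comply word required_frequencies)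

-- ===== LEMMAS AND PROOFS =====

-- Python's s.count(sub) for a one-character sub is the character count.
theorem pv_go_singleton (c : Char) (l : List Char) : ∀ (fuel acc : Nat), l.length ≤ fuel →
    PySem.Chars.count.go [c] fuel l acc = acc + l.count c := by
  induction l with
  | nil => intro fuel acc h; cases fuel <;> simp [PySem.Chars.count.go]
  | cons x t ih =>
    intro fuel acc h
    cases fuel with
    | zero => simp at h
    | succ n =>
      rw [PySem.Chars.count.go]
      by_cases hx : x = c
      · subst hx
        simp only [List.isPrefixOf]
        simp [ih n (acc + 1) (by simpa using h), Nat.add_comm, Nat.add_left_comm]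
      · have hpre : List.isPrefixOf [c] (x :: t) = false := by
          simp [List.isPrefixOf]; intro hcx; exact hx hcx.symm
        rw [hpre]
        simp [ih n acc (by simpa using h), hx]

theorem pv_count_singleton (s : List Char) (c : Char) :
    PySem.Chars.count s [c] = s.count c := by
  simpa using pv_go_singleton c s s.length 0 le_rfl

theorem pv_singleton_injective : Function.Injective String.singleton := by
  intro a b h
  simpa using congrArg String.toList h

-- A's counting loop is the Counter of the one-char-string list of word.
theorem pv_count_chars_eq (word : String) :
    count_chars word = PySem.Dict.counter (word.toList.map String.singleton) := by
  rw [← PySem.Dict.foldl_insert_getD_add_one_eq_counter, List.foldl_map]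
  unfold count_chars
  congr 1
  funext d k
  by_cases hc : d.contains (String.singleton k) = false
  · simp [hc, PySem.Dict.getD_of_not_contains d _ hc]
  · simp [hc]

-- a dict lookup's default is irrelevant on a contained key
theorem pv_getD_default_irrel {κ ν : Type} [BEq κ] (d : PySem.Dict κ ν) (k : κ)
    (h : d.contains k = true) (d1 d2 : ν) : d.getD k d1 = d.getD k d2 := by
  rw [PySem.Dict.getD_eq_get?_getD, PySem.Dict.getD_eq_get?_getD]
  rw [PySem.Dict.contains_eq_isSome_get?] at h
  cases hg : d.get? k <;> simp_all

-- A's early-return loop as List.all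
theorem pv_loopA_all (d : PySem.Dict String Int) (l : List (String × Int)) :
    dfcLoopA d l = l.all (fun p => !decide (d.getD p.1 (-1) ≠ -1 ∧ d.getD p.1 (-1) ≥ p.2)) := by
  induction l with
  | nil => rfl
  | cons p rest ih =>
    obtain ⟨letter, frequency⟩ := p
    rw [dfcLoopA, List.all_cons, ih]
    by_cases h : d.getD letter (-1) ≠ -1 ∧ d.getD letter (-1) ≥ frequency <;> simp [h]

-- B's early-return loop as List.all
theorem pv_loopB_all (word : String) (d : PySem.Dict String Int) (l : List Char) :
    dfcLoopB word d l = l.all (fun c => !decide (d.contains (String.singleton c) = true ∧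
      (PySem.Str.count word (String.singleton c) : Int) ≥ d.getD (String.singleton c) 0)) := by
  induction l with
  | nil => rfl
  | cons c rest ih =>
    rw [dfcLoopB, List.all_cons, ih]
    by_cases h : d.contains (String.singleton c) ∧
        (PySem.Str.count word (String.singleton c) : Int) ≥ d.getD (String.singleton c) 0 <;>
      simp [h]

-- running minimum of a list of Ints starting from an optional value
def pvCombine : Option Int → Int → Int
  | none, f => f
  | some m, f => if f < m then f else m

def pvMinFrom (o : Option Int) : List Int → Option Int
  | [] => o
  | f :: rest => pvMinFrom (some (pvCombine o f)) rest

-- mkLimits looked up at k is the running minimum of the frequencies required for k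
theorem pv_foldl_limits_get? (l : List (String × Int)) :
    ∀ (d : PySem.Dict String Int) (k : String),
      (l.foldl (fun limits p =>
        if limits.contains p.1 = false ∨ p.2 < limits.getD p.1 0 then
          limits.insert p.1 p.2
        else limits) d).get? k
      = pvMinFrom (d.get? k) ((l.filter (fun p => p.1 == k)).map Prod.snd) := by
  induction l with
  | nil => intro d k; rfl
  | cons p rest ih =>
    intro d k
    rw [List.foldl_cons]
    by_cases hk : p.1 = k
    · subst hk
      rw [List.filter_cons_of_pos (by simp), List.map_cons]
      cases hg : d.get? p.1 with
      | none =>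
        have hc : d.contains p.1 = false := by
          rw [PySem.Dict.contains_eq_isSome_get?, hg]; rfl
        rw [if_pos (Or.inl hc), ih, PySem.Dict.get?_insert_self]
        simp [pvMinFrom, pvCombine]
      | some m =>
        have hc : d.contains p.1 = true := by
          rw [PySem.Dict.contains_eq_isSome_get?, hg]; rfl
        have hgD : d.getD p.1 0 = m := PySem.Dict.getD_of_get?_eq_some _ 0 hg
        by_cases hlt : p.2 < m
        · rw [if_pos (Or.inr (hgD ▸ hlt)), ih, PySem.Dict.get?_insert_self]
          simp [pvMinFrom, pvCombine, hlt]
        · have : ¬ (d.contains p.1 = false ∨ p.2 < d.getD p.1 0) := by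
            rw [hgD, hc]; simp [hlt]
          rw [if_neg this, ih, hg]
          simp [pvMinFrom, pvCombine, hlt]
    · rw [List.filter_cons_of_neg (by simpa using hk)]
      by_cases hcond : d.contains p.1 = false ∨ p.2 < d.getD p.1 0
      · rw [if_pos hcond, ih, PySem.Dict.get?_insert_of_ne d p.2 (fun h => hk h.symm)]
      · rw [if_neg hcond, ih]

-- x is at least the running minimum iff x is at least one of the listed values (or the seed)
theorem pv_minFrom_ge (l : List Int) : ∀ (o : Option Int) (x : Int),
    (∃ m, pvMinFrom o l = some m ∧ x ≥ m) ↔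
      (∃ m, o = some m ∧ x ≥ m) ∨ ∃ f ∈ l, x ≥ f := by
  induction l with
  | nil => intro o x; simp [pvMinFrom]
  | cons f rest ih =>
    intro o x
    rw [pvMinFrom, ih]
    constructor
    · rintro (⟨m, hm, hx⟩ | ⟨g, hg, hx⟩)
      · cases o with
        | none =>
          simp only [Option.some.injEq, pvCombine] at hm
          exact Or.inr ⟨f, by simp, hm ▸ hx⟩
        | some v =>
          simp only [Option.some.injEq, pvCombine] at hm
          by_cases hlt : f < v
          · exact Or.inr ⟨f, by simp, by simp [hlt] at hm; omega⟩
          · exact Or.inl ⟨v, rfl, by simp [hlt] at hm; omega⟩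
      · exact Or.inr ⟨g, by simp [hg], hx⟩
    · rintro (⟨m, hm, hx⟩ | ⟨g, hg, hx⟩)
      · subst hm
        refine Or.inl ⟨_, rfl, ?_⟩
        by_cases hlt : f < m <;> simp [pvCombine, hlt] <;> omega
      · rcases List.mem_cons.mp hg with hgf | hgr
        · subst hgf
          refine Or.inl ⟨_, rfl, ?_⟩
          cases o with
          | none => exact hx
          | some v => by_cases hlt : g < v <;> simp [pvCombine, hlt] <;> omega
        · exact Or.inr ⟨g, hgr, hx⟩

-- A's per-item branch condition, characterised on the input
theorem pv_itemA_iff (word : String) (letter : String) (frequency : Int) :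
    ((PySem.Dict.counter (word.toList.map String.singleton)).getD letter (-1) ≠ -1 ∧
      (PySem.Dict.counter (word.toList.map String.singleton)).getD letter (-1) ≥ frequency) ↔
    ∃ c ∈ word.toList, letter = String.singleton c ∧ (word.toList.count c : Int) ≥ frequency := by
  by_cases hex : ∃ c ∈ word.toList, letter = String.singleton c
  · obtain ⟨c, hc, hlet⟩ := hex
    have hcontains : (PySem.Dict.counter (word.toList.map String.singleton)).contains letter = true := by
      rw [PySem.Dict.contains_counter]
      simp only [List.contains_eq_mem, decide_eq_true_eq, List.mem_map, hlet]
      exact ⟨c, hc, rfl⟩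
    have ha : (PySem.Dict.counter (word.toList.map String.singleton)).getD letter (-1)
        = (word.toList.count c : Int) := by
      rw [pv_getD_default_irrel _ _ hcontains (-1) 0, PySem.Dict.getD_counter, hlet,
        List.count_map_of_injective _ _ pv_singleton_injective c]
    have hpos : 1 ≤ word.toList.count c := List.one_le_count_iff.mpr hc
    rw [ha]
    constructor
    · rintro ⟨-, hge⟩
      exact ⟨c, hc, hlet, hge⟩
    · rintro ⟨c', _, hlet', hge⟩
      have : c' = c := pv_singleton_injective (hlet ▸ hlet').symm
      exact ⟨by omega, this ▸ hge⟩
  · have hnc : (PySem.Dict.counter (word.toList.map String.singleton)).contains letter = false := by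
      rw [PySem.Dict.contains_counter]
      simp only [List.contains_eq_mem, decide_eq_false_iff_not, List.mem_map]
      rintro ⟨x, hx, hxe⟩
      exact hex ⟨x, hx, hxe.symm⟩
    rw [PySem.Dict.getD_of_not_contains _ _ hnc]
    simp only [ne_eq, not_true_eq_false, false_and, false_iff]
    rintro ⟨c, hc, hlet, -⟩
    exact hex ⟨c, hc, hlet⟩

-- B's per-item test, characterised on the input
theorem pv_itemB_iff (word : String) (required_frequencies : List (String × Int)) (c : Char) :
    ((mkLimits required_frequencies).contains (String.singleton c) = true ∧
      (PySem.Str.count word (String.singleton c) : Int) ≥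
        (mkLimits required_frequencies).getD (String.singleton c) 0) ↔
    ∃ p ∈ required_frequencies, p.1 = String.singleton c ∧
      (word.toList.count c : Int) ≥ p.2 := by
  have hget : (mkLimits required_frequencies).get? (String.singleton c)
      = pvMinFrom none ((required_frequencies.filter
          (fun p => p.1 == String.singleton c)).map Prod.snd) := by
    unfold mkLimits
    rw [pv_foldl_limits_get?]
    rfl
  have hcnt : (PySem.Str.count word (String.singleton c) : Int) = (word.toList.count c : Int) := by
    rw [PySem.Str.count_eq]
    simp [pv_count_singleton]
  constructor
  · rintro ⟨hcon, hge⟩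
    rw [PySem.Dict.contains_eq_isSome_get?] at hcon
    obtain ⟨m, hm⟩ := Option.isSome_iff_exists.mp hcon
    have hgD : (mkLimits required_frequencies).getD (String.singleton c) 0 = m :=
      PySem.Dict.getD_of_get?_eq_some _ 0 hm
    have : ∃ m', pvMinFrom none ((required_frequencies.filter
        (fun p => p.1 == String.singleton c)).map Prod.snd) = some m' ∧
        (word.toList.count c : Int) ≥ m' := by
      exact ⟨m, hget ▸ hm, by rw [← hcnt]; omega⟩
    rcases (pv_minFrom_ge _ none _).mp this with ⟨m', hm', -⟩ | ⟨f, hf, hxf⟩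
    · simp at hm'
    · obtain ⟨p, hpmem, hpf⟩ := List.mem_map.mp hf
      have hpfilter := List.mem_filter.mp hpmem
      exact ⟨p, hpfilter.1, by simpa using hpfilter.2, hpf ▸ hxf⟩
  · rintro ⟨p, hpmem, hp1, hge⟩
    have hf : p.2 ∈ (required_frequencies.filter
        (fun p => p.1 == String.singleton c)).map Prod.snd :=
      List.mem_map.mpr ⟨p, List.mem_filter.mpr ⟨hpmem, by simp [hp1]⟩, rfl⟩
    obtain ⟨m, hm, hxm⟩ := (pv_minFrom_ge _ none (word.toList.count c : Int)).mpr
      (Or.inr ⟨p.2, hf, hge⟩)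
    have hm' : (mkLimits required_frequencies).get? (String.singleton c) = some m := hget ▸ hm
    refine ⟨?_, ?_⟩
    · rw [PySem.Dict.contains_eq_isSome_get?, hm']; rfl
    · rw [PySem.Dict.getD_of_get?_eq_some _ 0 hm', hcnt]; exact hxm

-- ===== VERDICT (by name: the statement is the Claim_ definition above) =====
theorem do_frequencies_comply_spec : Claim_equal_do_frequencies_comply := by
  intro word reqs _
  unfold Spec_do_frequencies_comply do_frequencies_comply do_frequencies_comply_alt
  rw [pv_count_chars_eq, pv_loopA_all, pv_loopB_all]
  rw [Bool.eq_iff_iff]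
  simp only [List.all_eq_true, Bool.not_eq_eq_eq_not, Bool.not_true, decide_eq_false_iff_not]
  constructor
  · intro hA c hc
    rw [pv_itemB_iff]
    rintro ⟨p, hpmem, hp1, hge⟩
    exact hA p hpmem ((pv_itemA_iff word p.1 p.2).mpr
      ⟨c, (PySem.Set.mem_ofList _ _).mp hc, hp1, hge⟩)
  · intro hB p hpmem
    rw [pv_itemA_iff]
    rintro ⟨c, hc, hlet, hge⟩
    exact hB c ((PySem.Set.mem_ofList _ _).mpr hc)
      ((pv_itemB_iff word reqs c).mpr ⟨p, hpmem, hlet, hge⟩)
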